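-- pv_equiv track=rewrite | github.com/ShuvalovAnthony/ez_python | Mihail/9/20955/20955.py | check
-- ===== SOURCE A (Python) =====
-- def check(row: list):
--     uniq = []
--     povtor = []
--     for i in row:
--         if row.count(i) == 1:
--             uniq.append(i)
--         if row.count(i) == 2:
--             povtor.append(i)
--
--     return(
--         (len(povtor) == 4 and len(uniq) == 4) and (sum(povtor) >= sum(uniq)*2)
--     )
-- ===== SOURCE B (Python) =====
-- def check(row: list):
--     counts = {}
--     for x in row:
--         counts[x] = counts.get(x, 0) + 1
--     n1 = s1 = n2 = s2 = 0
--     for v, c in counts.items():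
--         if c == 1:
--             n1 += 1
--             s1 += v
--         elif c == 2:
--             n2 += 2
--             s2 += 2 * v
--     return n2 == 4 and n1 == 4 and s2 >= s1 * 2
-- ===== Notes on version B (the rewrite author's own statement) =====
-- stated objective: faster
-- what changed: Replaces A's per-element row.count scans (quadratic) with one pass building a dict of counts, then a single pass over the distinct values accumulating singleton/pair counts and sums.
import Mathlib
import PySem

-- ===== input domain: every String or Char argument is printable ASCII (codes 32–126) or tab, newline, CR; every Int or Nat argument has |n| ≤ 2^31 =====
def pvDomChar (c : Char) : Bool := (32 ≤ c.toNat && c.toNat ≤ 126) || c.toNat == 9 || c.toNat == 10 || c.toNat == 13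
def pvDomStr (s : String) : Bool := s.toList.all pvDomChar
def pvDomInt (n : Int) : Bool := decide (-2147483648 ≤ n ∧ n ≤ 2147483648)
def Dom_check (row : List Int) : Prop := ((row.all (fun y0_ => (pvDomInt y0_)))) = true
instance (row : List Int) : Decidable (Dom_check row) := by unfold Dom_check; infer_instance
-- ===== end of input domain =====

-- B replaces A's quadratic per-element row.count scans by one counting pass over a dict
-- plus one pass over the distinct values (objective: faster).

-- ===== PORT A =====
def check (row : List Int) : Bool :=
  let st := row.foldl (fun (st : List Int × List Int) i =>
    let st1 := if row.count i = 1 then (st.1 ++ [i], st.2) else st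
    if row.count i = 2 then (st1.1, st1.2 ++ [i]) else st1) ([], [])
  ((st.2.length == 4) && (st.1.length == 4)) && decide (st.2.sum ≥ st.1.sum * 2)

-- ===== PORT B =====
def check_alt (row : List Int) : Bool :=
  let counts : PySem.Dict Int Int :=
    row.foldl (fun d x => d.insert x (d.getD x 0 + 1)) PySem.Dict.empty
  let st := counts.items.foldl (fun (acc : Int × Int × Int × Int) vc =>
    if vc.2 = 1 then (acc.1 + 1, acc.2.1 + vc.1, acc.2.2.1, acc.2.2.2)
    else if vc.2 = 2 then (acc.1, acc.2.1, acc.2.2.1 + 2, acc.2.2.2 + 2 * vc.1)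
    else acc) ((0 : Int), (0 : Int), (0 : Int), (0 : Int))
  ((st.2.2.1 == 4) && (st.1 == 4)) && decide (st.2.2.2 ≥ st.2.1 * 2)

-- ===== PRECONDITION & SPEC =====
def Spec_check (row : List Int) (out : Bool) : Prop := out = check_alt row
instance (row : List Int) (out : Bool) : Decidable (Spec_check row out) := by unfold Spec_check; infer_instance

-- ===== CLAIM (what is proved, stated in full; the proofs are below) =====
def Claim_equal_check : Prop := ∀ (row : List Int), Dom_check row → Spec_check row (check row)

-- ===== LEMMAS AND PROOFS =====

-- A's loop appends exactly the elements whose row-count is 1 (resp. 2).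
theorem a_fold (c : Int → Nat) (l : List Int) : ∀ (u p : List Int),
    l.foldl (fun (st : List Int × List Int) i =>
        let st1 := if c i = 1 then (st.1 ++ [i], st.2) else st
        if c i = 2 then (st1.1, st1.2 ++ [i]) else st1) (u, p)
    = (u ++ l.filter (fun i => c i == 1), p ++ l.filter (fun i => c i == 2)) := by
  induction l with
  | nil => simp
  | cons a t ih =>
    intro u p
    by_cases h1 : c a = 1
    · have h2 : ¬ c a = 2 := by omega
      simp [h1, ih]
    · by_cases h2 : c a = 2
      · simp [h2, ih]
      · simp [h1, h2, ih]

-- B's loop over (value, count) pairs computes the four sums.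
theorem b_fold (its : List (Int × Int)) : ∀ (n1 s1 n2 s2 : Int),
    its.foldl (fun (acc : Int × Int × Int × Int) vc =>
        if vc.2 = 1 then (acc.1 + 1, acc.2.1 + vc.1, acc.2.2.1, acc.2.2.2)
        else if vc.2 = 2 then (acc.1, acc.2.1, acc.2.2.1 + 2, acc.2.2.2 + 2 * vc.1)
        else acc) (n1, s1, n2, s2)
    = (n1 + (its.countP (fun vc => vc.2 == 1) : Int),
       s1 + ((its.filter (fun vc => vc.2 == 1)).map Prod.fst).sum,
       n2 + 2 * (its.countP (fun vc => vc.2 == 2) : Int),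
       s2 + 2 * ((its.filter (fun vc => vc.2 == 2)).map Prod.fst).sum) := by
  induction its with
  | nil => simp
  | cons a t ih =>
    intro n1 s1 n2 s2
    by_cases h1 : a.2 = 1
    · have h2 : ¬ a.2 = 2 := by omega
      simp [h1, ih]; ring_nf; simp
    · by_cases h2 : a.2 = 2
      · simp [h2, ih]; ring_nf; simp
      · simp [h1, h2, ih]

theorem count_filter_list (p : Int → Bool) (a : Int) (l : List Int) :
    (l.filter p).count a = if p a then l.count a else 0 := by
  induction l with
  | nil => simp
  | cons b t ih =>
    by_cases hb : p b
    · by_cases hab : b = a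
      · subst hab; simp [hb, ih]
      · simp [hb, hab, ih]
    · by_cases hab : b = a
      · subst hab; simp [hb, ih]
      · simp [hb, hab, ih]

theorem count_flatMap_replicate (k : Nat) (a : Int) : ∀ (m : List Int), m.Nodup →
    (m.flatMap (fun x => List.replicate k x)).count a = if a ∈ m then k else 0 := by
  intro m
  induction m with
  | nil => simp
  | cons b t ih =>
    intro hnd
    have hndt : t.Nodup := (List.nodup_cons.mp hnd).2
    have hbt : b ∉ t := (List.nodup_cons.mp hnd).1
    by_cases hab : a = b
    · subst hab
      simp [List.flatMap_cons, List.count_append, ih hndt, hbt]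
    · simp [List.flatMap_cons, List.count_append, ih hndt, List.count_replicate,
        Ne.symm hab, hab]

-- The elements of row with row-count k, as a multiset, are k copies of each
-- distinct such element.
theorem perm_key (row : List Int) (k : Nat) (hk : 0 < k) :
    (row.filter (fun x => row.count x == k)).Perm
      (((PySem.List.dedup row).filter (fun x => row.count x == k)).flatMap
        (fun x => List.replicate k x)) := by
  rw [List.perm_iff_count]
  intro a
  have hnd : ((PySem.List.dedup row).filter (fun x => row.count x == k)).Nodup :=
    (PySem.List.nodup_dedup row).filter _
  rw [count_flatMap_replicate k a _ hnd, count_filter_list]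
  by_cases h : row.count a = k
  · have hmem : a ∈ row := by
      rw [← List.count_pos_iff]; omega
    have : a ∈ (PySem.List.dedup row).filter (fun x => row.count x == k) := by
      rw [List.mem_filter]
      exact ⟨(PySem.List.mem_dedup row a).mpr hmem, by simp [h]⟩
    simp [h, hmem]
  · have : a ∉ (PySem.List.dedup row).filter (fun x => row.count x == k) := by
      rw [List.mem_filter]; simp [h]
    simp [h]

theorem len_flatMap_replicate (k : Nat) (m : List Int) :
    (m.flatMap (fun x => List.replicate k x)).length = k * m.length := by
  induction m with
  | nil => simp
  | cons b t ih => simp [List.flatMap_cons, ih]; ring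

theorem sum_flatMap_replicate (k : Nat) (m : List Int) :
    (m.flatMap (fun x => List.replicate k x)).sum = (k : Int) * m.sum := by
  induction m with
  | nil => simp
  | cons b t ih => simp [List.flatMap_cons, ih, List.sum_replicate]; ring

theorem filter_len_key (row : List Int) (k : Nat) (hk : 0 < k) :
    (row.filter (fun x => row.count x == k)).length
      = k * ((PySem.List.dedup row).filter (fun x => row.count x == k)).length := by
  rw [(perm_key row k hk).length_eq, len_flatMap_replicate]

theorem filter_sum_key (row : List Int) (k : Nat) (hk : 0 < k) :
    (row.filter (fun x => row.count x == k)).sum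
      = (k : Int) * ((PySem.List.dedup row).filter (fun x => row.count x == k)).sum := by
  rw [(perm_key row k hk).sum_eq, sum_flatMap_replicate]

theorem map_pair_countP (d : List Int) (c : Int → Nat) (ki : Int) (k : Nat) (h : ki = (k : Int)) :
    (d.map (fun x => (x, (c x : Int)))).countP (fun vc => vc.2 == ki)
      = (d.filter (fun x => c x == k)).length := by
  subst h
  rw [List.countP_map, ← List.countP_eq_length_filter]
  apply List.countP_congr
  intro x _
  simp [Function.comp, beq_iff_eq]

theorem map_pair_filter_sum (d : List Int) (c : Int → Nat) (ki : Int) (k : Nat) (h : ki = (k : Int)) :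
    ((((d.map (fun x => (x, (c x : Int)))).filter (fun vc => vc.2 == ki)).map Prod.fst).sum)
      = (d.filter (fun x => c x == k)).sum := by
  subst h
  rw [List.filter_map, List.map_map]
  have : (d.filter ((fun vc : Int × Int => vc.2 == (k : Int)) ∘ (fun x => (x, (c x : Int)))))
      = d.filter (fun x => c x == k) := by
    apply List.filter_congr
    intro x _
    simp [Function.comp]
  rw [this]
  congr 1
  simp [Function.comp_def]

-- ===== VERDICT (by name: the statement is the Claim_ definition above) =====
theorem check_spec : Claim_equal_check := by
  intro row _
  unfold Spec_check
  have hA : check row =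
      ((((row.filter (fun x => row.count x == 2)).length == 4) &&
        ((row.filter (fun x => row.count x == 1)).length == 4)) &&
       decide ((row.filter (fun x => row.count x == 2)).sum ≥
         (row.filter (fun x => row.count x == 1)).sum * 2)) := by
    simp only [check]
    rw [a_fold (fun i => row.count i) row [] []]
    simp
  have hB : check_alt row =
      (((2 * ((((PySem.List.dedup row).filter (fun x => row.count x == 2)).length : Int)) == 4) &&
        (((((PySem.List.dedup row).filter (fun x => row.count x == 1)).length : Int)) == 4)) &&
       decide (2 * ((PySem.List.dedup row).filter (fun x => row.count x == 2)).sum ≥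
         ((PySem.List.dedup row).filter (fun x => row.count x == 1)).sum * 2)) := by
    simp only [check_alt]
    rw [PySem.Dict.foldl_insert_getD_add_one_eq_counter, PySem.Dict.items_counter]
    rw [b_fold, ← PySem.List.dedup_eq_ofList]
    rw [map_pair_countP _ _ 1 1 (by norm_num), map_pair_countP _ _ 2 2 (by norm_num),
        map_pair_filter_sum _ _ 1 1 (by norm_num), map_pair_filter_sum _ _ 2 2 (by norm_num)]
    simp
  rw [hA, hB]
  rw [filter_len_key row 1 (by norm_num), filter_len_key row 2 (by norm_num),
      filter_sum_key row 1 (by norm_num), filter_sum_key row 2 (by norm_num)]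
  generalize ((PySem.List.dedup row).filter (fun x => row.count x == 2)).length = L2
  generalize ((PySem.List.dedup row).filter (fun x => row.count x == 1)).length = L1
  generalize ((PySem.List.dedup row).filter (fun x => row.count x == 2)).sum = S2
  generalize ((PySem.List.dedup row).filter (fun x => row.count x == 1)).sum = S1
  have e1 : ((2 * L2 == 4) : Bool) = (2 * (L2 : Int) == 4) := by
    rw [Bool.eq_iff_iff]; simp [beq_iff_eq]; omega
  have e2 : ((1 * L1 == 4) : Bool) = ((L1 : Int) == 4) := by
    rw [Bool.eq_iff_iff]; simp [beq_iff_eq]; omega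
  have e3 : (decide (((2 : Nat) : Int) * S2 ≥ ((1 : Nat) : Int) * S1 * 2))
      = decide (2 * S2 ≥ S1 * 2) := by
    rw [decide_eq_decide]; push_cast; constructor <;> intro <;> omega
  rw [e1, e2, e3]
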